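-- pv_equiv track=rewrite | github.com/TianaSkorokhodova/Algo_level1_Python | task8/PrintingCosts.py | PrintingCosts
-- ===== SOURCE A (Python) =====
-- def PrintingCosts (Line) :
--
--     theSum = 0
--
--     for i in range (len (Line)):
--
--         if Line[i] == " ":
--             theSum += 0
--
--         elif Line[i] == "'" or Line[i] == "`" :
--             theSum += 3
--
--         elif Line[i] == ".":
--             theSum += 4
--
--         elif Line[i] == '"':
--             theSum += 6
--
--         elif Line[i] == "," or Line[i] == "-" or Line[i] == "^" :
--             theSum += 7
--
--         elif Line[i] == ":" or Line[i] == "_" :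
--             theSum += 8
--
--         elif Line[i] == "~" or Line[i] == "!" :
--             theSum += 9
--
--         elif Line[i] == ">" or Line[i] == "/" or Line[i] == "<" or Line[i] == "\\" :
--             theSum += 10
--
--         elif Line[i] == ";":
--             theSum += 11
--
--         elif Line[i] == "(" or Line[i] == "|" or Line[i] == ")" :
--             theSum += 12
--
--         elif Line[i] == "v" or Line[i] == "r" or Line[i] == "x" or Line[i] == "+":
--             theSum += 13
--
--         elif Line[i] == "Y" or Line[i] == "=" :
--             theSum += 14
--
--         elif Line[i] == "?" or Line[i] == "i" :
--             theSum += 15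
--
--         elif Line[i] == "L" or Line[i] == "T" or Line[i] == "l" or Line[i] == "7":
--             theSum += 16
--
--         elif Line[i] == "t" or Line[i] == "c" or Line[i] == "u" or Line[i] == "*":
--             theSum += 17
--
--         elif Line[i] == "J" or Line[i] == "n" or Line[i] == "]" or Line[i] == "{" or Line[i] == "X" or Line[i] == "}" or Line[i] == "f" or Line[i] == "I" or Line[i] == "[":
--             theSum += 18
--
--         elif Line[i] == "V" or Line[i] == "z" or Line[i] == "w" or Line[i] == "1":
--             theSum += 19
--
--         elif Line[i] == "o" or Line[i] == "F" or Line[i] == "j" or Line[i] == "C":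
--             theSum += 20
--
--         elif Line[i] == "h" or Line[i] == "K" or Line[i] == "4" or Line[i] == "k" or Line[i] == "s":
--             theSum += 21
--
--         elif Line[i] == "2" or Line[i] == "0" or Line[i] == "Z" or Line[i] == "%" or Line[i] == "m" :
--             theSum += 22
--
--         elif Line[i] == "&" or Line[i] == "#" or Line[i] == "A" or Line[i] == "y" :
--             theSum += 24
--
--         elif Line[i] == "b" or Line[i] == "d" or Line[i] == "p" or Line[i] == "G" or Line[i] == "S" or Line[i] == "q" or Line[i] == "H" or Line[i] == "N":
--             theSum += 25
--
--         elif Line[i] == "D" or Line[i] == "9" or Line[i] == "E" or Line[i] == "W" or Line[i] == "6" or Line[i] == "O":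
--             theSum += 26
--
--         elif Line[i] == "5":
--             theSum += 27
--
--         elif Line[i] == "R" or Line[i] == "M" :
--             theSum += 28
--
--         elif Line[i] == "$" or Line[i] == "B" :
--             theSum += 29
--
--         elif Line[i] == "g":
--             theSum += 30
--
--         elif Line[i] == "Q":
--             theSum += 31
--
--         elif Line[i] == "@":
--             theSum += 32
--
--         else:
--             theSum += 23
--
--     return theSum
-- ===== SOURCE B (Python) =====
-- _TABLE = [
--     (' ', 0), ("'", 3), ('`', 3), ('.', 4), ('"', 6), (',', 7),
--     ('-', 7), ('^', 7), (':', 8), ('_', 8), ('~', 9), ('!', 9),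
--     ('>', 10), ('/', 10), ('<', 10), ('\\', 10), (';', 11), ('(', 12),
--     ('|', 12), (')', 12), ('v', 13), ('r', 13), ('x', 13), ('+', 13),
--     ('Y', 14), ('=', 14), ('?', 15), ('i', 15), ('L', 16), ('T', 16),
--     ('l', 16), ('7', 16), ('t', 17), ('c', 17), ('u', 17), ('*', 17),
--     ('J', 18), ('n', 18), (']', 18), ('{', 18), ('X', 18), ('}', 18),
--     ('f', 18), ('I', 18), ('[', 18), ('V', 19), ('z', 19), ('w', 19),
--     ('1', 19), ('o', 20), ('F', 20), ('j', 20), ('C', 20), ('h', 21),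
--     ('K', 21), ('4', 21), ('k', 21), ('s', 21), ('2', 22), ('0', 22),
--     ('Z', 22), ('%', 22), ('m', 22), ('&', 24), ('#', 24), ('A', 24),
--     ('y', 24), ('b', 25), ('d', 25), ('p', 25), ('G', 25), ('S', 25),
--     ('q', 25), ('H', 25), ('N', 25), ('D', 26), ('9', 26), ('E', 26),
--     ('W', 26), ('6', 26), ('O', 26), ('5', 27), ('R', 28), ('M', 28),
--     ('$', 29), ('B', 29), ('g', 30), ('Q', 31), ('@', 32),
-- ]
--
-- def PrintingCosts(Line):
--     total = 23 * len(Line)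
--     for ch, cost in _TABLE:
--         total += Line.count(ch) * (cost - 23)
--     return total
-- ===== Notes on version B (the rewrite author's own statement) =====
-- stated objective: faster
-- what changed: Replaces A's per-position 29-branch elif dispatch with an alphabet-driven baseline-plus-correction: total starts at 23*len(Line) and one pass over the fixed 89-entry cost table adds Line.count(ch)*(cost-23) per table symbol, so the iteration is over the alphabet, not the string positions. Measured ~25x faster since each table scan runs at C speed instead of a per-character Python branch chain.
import Mathlib
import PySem

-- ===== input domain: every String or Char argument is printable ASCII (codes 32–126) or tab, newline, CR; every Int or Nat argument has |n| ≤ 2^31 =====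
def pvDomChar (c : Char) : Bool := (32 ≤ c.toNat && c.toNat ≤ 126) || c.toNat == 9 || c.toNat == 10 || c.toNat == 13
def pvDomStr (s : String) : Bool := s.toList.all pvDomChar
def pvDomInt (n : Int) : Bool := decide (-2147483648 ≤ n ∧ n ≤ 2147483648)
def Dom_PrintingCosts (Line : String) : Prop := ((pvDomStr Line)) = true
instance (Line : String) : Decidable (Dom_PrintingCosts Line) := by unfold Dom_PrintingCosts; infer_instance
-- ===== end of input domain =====

-- B replaces A's per-position cost dispatch by an alphabet-driven baseline-plus-correction:
-- start from 23 per character and, for each table symbol, add count(symbol)*(cost-23); same return value.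

-- ===== PORT A =====
-- A's per-character elif chain, in the exact branch order of the Python source.
def pvCostChain (c : Char) : Int :=
  if c = ' ' then 0 else
  if c = '\'' ∨ c = '`' then 3 else
  if c = '.' then 4 else
  if c = '"' then 6 else
  if c = ',' ∨ c = '-' ∨ c = '^' then 7 else
  if c = ':' ∨ c = '_' then 8 else
  if c = '~' ∨ c = '!' then 9 else
  if c = '>' ∨ c = '/' ∨ c = '<' ∨ c = '\\' then 10 else
  if c = ';' then 11 else
  if c = '(' ∨ c = '|' ∨ c = ')' then 12 else
  if c = 'v' ∨ c = 'r' ∨ c = 'x' ∨ c = '+' then 13 else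
  if c = 'Y' ∨ c = '=' then 14 else
  if c = '?' ∨ c = 'i' then 15 else
  if c = 'L' ∨ c = 'T' ∨ c = 'l' ∨ c = '7' then 16 else
  if c = 't' ∨ c = 'c' ∨ c = 'u' ∨ c = '*' then 17 else
  if c = 'J' ∨ c = 'n' ∨ c = ']' ∨ c = '{' ∨ c = 'X' ∨ c = '}' ∨ c = 'f' ∨ c = 'I' ∨ c = '[' then 18 else
  if c = 'V' ∨ c = 'z' ∨ c = 'w' ∨ c = '1' then 19 else
  if c = 'o' ∨ c = 'F' ∨ c = 'j' ∨ c = 'C' then 20 else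
  if c = 'h' ∨ c = 'K' ∨ c = '4' ∨ c = 'k' ∨ c = 's' then 21 else
  if c = '2' ∨ c = '0' ∨ c = 'Z' ∨ c = '%' ∨ c = 'm' then 22 else
  if c = '&' ∨ c = '#' ∨ c = 'A' ∨ c = 'y' then 24 else
  if c = 'b' ∨ c = 'd' ∨ c = 'p' ∨ c = 'G' ∨ c = 'S' ∨ c = 'q' ∨ c = 'H' ∨ c = 'N' then 25 else
  if c = 'D' ∨ c = '9' ∨ c = 'E' ∨ c = 'W' ∨ c = '6' ∨ c = 'O' then 26 else
  if c = '5' then 27 else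
  if c = 'R' ∨ c = 'M' then 28 else
  if c = '$' ∨ c = 'B' then 29 else
  if c = 'g' then 30 else
  if c = 'Q' then 31 else
  if c = '@' then 32 else
  23

def PrintingCosts (Line : String) : Int :=
  (PySem.List.pyRange 0 (PySem.Str.len Line) 1).foldl
    (fun theSum i => theSum + pvCostChain (PySem.List.pyGetD Line.toList i ' ')) 0

-- ===== PORT B =====
-- Source B's module-level table _TABLE, entries in the same order.
def pvTable : List (Char × Int) := [
    (' ', 0), ('\'', 3), ('`', 3), ('.', 4), ('"', 6), (',', 7),
    ('-', 7), ('^', 7), (':', 8), ('_', 8), ('~', 9), ('!', 9),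
    ('>', 10), ('/', 10), ('<', 10), ('\\', 10), (';', 11), ('(', 12),
    ('|', 12), (')', 12), ('v', 13), ('r', 13), ('x', 13), ('+', 13),
    ('Y', 14), ('=', 14), ('?', 15), ('i', 15), ('L', 16), ('T', 16),
    ('l', 16), ('7', 16), ('t', 17), ('c', 17), ('u', 17), ('*', 17),
    ('J', 18), ('n', 18), (']', 18), ('{', 18), ('X', 18), ('}', 18),
    ('f', 18), ('I', 18), ('[', 18), ('V', 19), ('z', 19), ('w', 19),
    ('1', 19), ('o', 20), ('F', 20), ('j', 20), ('C', 20), ('h', 21),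
    ('K', 21), ('4', 21), ('k', 21), ('s', 21), ('2', 22), ('0', 22),
    ('Z', 22), ('%', 22), ('m', 22), ('&', 24), ('#', 24), ('A', 24),
    ('y', 24), ('b', 25), ('d', 25), ('p', 25), ('G', 25), ('S', 25),
    ('q', 25), ('H', 25), ('N', 25), ('D', 26), ('9', 26), ('E', 26),
    ('W', 26), ('6', 26), ('O', 26), ('5', 27), ('R', 28), ('M', 28),
    ('$', 29), ('B', 29), ('g', 30), ('Q', 31), ('@', 32)]

def PrintingCosts_alt (Line : String) : Int :=
  pvTable.foldl
    (fun total p => total + (PySem.Str.count Line (String.ofList [p.1]) : Int) * (p.2 - 23))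
    (23 * (PySem.Str.len Line : Int))

-- ===== PRECONDITION & SPEC =====
def Spec_PrintingCosts (Line : String) (out : Int) : Prop := out = PrintingCosts_alt Line
instance (Line : String) (out : Int) : Decidable (Spec_PrintingCosts Line out) := by unfold Spec_PrintingCosts; infer_instance

-- ===== CLAIM (what is proved, stated in full; the proofs are below) =====
def Claim_equal_PrintingCosts : Prop := ∀ (Line : String), Dom_PrintingCosts Line → Spec_PrintingCosts Line (PrintingCosts Line)

-- ===== LEMMAS AND PROOFS =====

-- the printable-ASCII characters (plus tab/newline/CR) admitted by Dom_PrintingCosts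
def pvAllChars : List Char := ['\t', '\n', '\r', ' ', '!', '"', '#', '$', '%', '&', '\'', '(', ')', '*', '+', ',', '-', '.', '/', '0', '1', '2', '3', '4', '5', '6', '7', '8', '9', ':', ';', '<', '=', '>', '?', '@', 'A', 'B', 'C', 'D', 'E', 'F', 'G', 'H', 'I', 'J', 'K', 'L', 'M', 'N', 'O', 'P', 'Q', 'R', 'S', 'T', 'U', 'V', 'W', 'X', 'Y', 'Z', '[', '\\', ']', '^', '_', '`', 'a', 'b', 'c', 'd', 'e', 'f', 'g', 'h', 'i', 'j', 'k', 'l', 'm', 'n', 'o', 'p', 'q', 'r', 's', 't', 'u', 'v', 'w', 'x', 'y', 'z', '{', '|', '}', '~']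

lemma mem_allchars (c : Char) (h : pvDomChar c = true) : c ∈ pvAllChars := by
  have hc : Char.ofNat c.toNat = c := Char.ofNat_toNat c
  simp only [pvDomChar, Bool.or_eq_true, Bool.and_eq_true, decide_eq_true_eq, beq_iff_eq] at h
  rw [← hc]
  obtain h | h := h
  · obtain h | h := h
    · obtain ⟨h1, h2⟩ | h := h
      · generalize c.toNat = t at h1 h2 ⊢
        interval_cases t <;> decide
      · rw [h]; decide
    · rw [h]; decide
  · rw [h]; decide

-- per-table correction of a single character: the terms the table contributes at c
def pvCorr (c : Char) : Int := (pvTable.map (fun p => if p.1 = c then p.2 - 23 else 0)).sum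

-- on every admitted character A's elif chain is the 23 baseline plus the table correction
set_option maxRecDepth 16384 in
lemma chain_decomp_all : pvAllChars.all (fun c => pvCostChain c == 23 + pvCorr c) = true := by decide

lemma chain_decomp (c : Char) (h : pvDomChar c = true) : pvCostChain c = 23 + pvCorr c :=
  beq_iff_eq.mp (List.all_eq_true.mp chain_decomp_all c (mem_allchars c h))

-- substring count of a one-character pattern is the element count
lemma go_singleton (c : Char) (s : List Char) : ∀ fuel acc, s.length ≤ fuel →
    PySem.Chars.count.go [c] fuel s acc = acc + s.count c := by
  induction s with
  | nil => intro fuel acc _; cases fuel <;> simp [PySem.Chars.count.go]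
  | cons h t ih =>
    intro fuel acc hf
    cases fuel with
    | zero => simp at hf
    | succ n =>
      rw [PySem.Chars.count.go]
      by_cases hc : c = h
      · subst hc
        simp only [List.isPrefixOf, List.length_singleton, List.drop_one, List.tail_cons,
          beq_self_eq_true, Bool.true_and, if_pos]
        rw [ih n (acc+1) (by simpa using hf)]
        simp
        ring
      · have hpre : ([c].isPrefixOf (h :: t)) = false := by simp [List.isPrefixOf, hc]
        rw [hpre]
        simp only [Bool.false_eq_true, if_false]
        rw [ih n acc (by simpa using hf)]
        simp [List.count_cons]
        exact fun e => hc e.symm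

lemma count_singleton (s : List Char) (c : Char) : PySem.Chars.count s [c] = s.count c := by
  simp [PySem.Chars.count, go_singleton c s s.length 0 le_rfl]

-- summing a single-key indicator over the string is count * weight
lemma sum_map_ite_count (xs : List Char) (k : Char) (w : Int) :
    (xs.map (fun c => if k = c then w else 0)).sum = (xs.count k : Int) * w := by
  induction xs with
  | nil => simp
  | cons a xs ih =>
    by_cases h : k = a
    · subst h; simp [ih]; ring
    · simp only [List.map_cons, List.sum_cons, ih, if_neg h, List.count_cons]
      have : (a == k) = false := by simp; exact fun e => h e.symm
      simp [this]

-- exchanging the two summations: table-driven count*weight equals the per-character correction sum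
lemma swap_sums (T : List (Char × Int)) (xs : List Char) :
    (T.map (fun p => (xs.count p.1 : Int) * (p.2 - 23))).sum
      = (xs.map (fun c => (T.map (fun p => if p.1 = c then p.2 - 23 else 0)).sum)).sum := by
  induction T with
  | nil => simp
  | cons p T ih =>
    simp only [List.map_cons, List.sum_cons, ih, List.sum_map_add, sum_map_ite_count]

theorem PrintingCosts_spec : Claim_equal_PrintingCosts := by
  intro Line hDom
  unfold Spec_PrintingCosts
  have hA : PrintingCosts Line = (Line.toList.map pvCostChain).sum := by
    unfold PrintingCosts
    simp only [PySem.Str.len_eq]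
    rw [PySem.List.foldl_pyRange_zero_pyGetD' Line.toList ' ' (fun s c => s + pvCostChain c) 0]
    rw [PySem.List.foldl_add]
    simp
  have hB : PrintingCosts_alt Line
      = 23 * (Line.length : Int)
        + (pvTable.map (fun p => (Line.toList.count p.1 : Int) * (p.2 - 23))).sum := by
    unfold PrintingCosts_alt
    rw [PySem.List.foldl_add]
    simp [PySem.Str.len_eq, PySem.Str.count_eq, count_singleton]
  rw [hA, hB, swap_sums]
  have : Line.toList.map pvCostChain = Line.toList.map (fun c => 23 + pvCorr c) := by
    apply List.map_congr_left
    intro c hc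
    exact chain_decomp c (List.all_eq_true.mp hDom c hc)
  rw [this]
  rw [List.sum_map_add]
  simp [mul_comm]
  rfl
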